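-- pv_equiv track=rewrite | github.com/josecruzp-enee/FV_Jose_nikol | analizador_arquitectura.py | detectar_huerfanas
-- ===== SOURCE A (Python) =====
-- def detectar_huerfanas(calls):
--
--     llamadas = set()
--
--     for v in calls.values():
--         llamadas.update(v)
--
--     huerfanas = []
--
--     for f in calls:
--
--         if f not in llamadas:
--             huerfanas.append(f)
--
--     return huerfanas
-- ===== SOURCE B (Python) =====
-- def detectar_huerfanas(calls):
--     return [f for f in calls if not any(f in v for v in calls.values())]
-- ===== Notes on version B (the rewrite author's own statement) =====
-- stated objective: simpler
-- what changed: Replaces the precomputed union set plus accumulator loop with a single comprehension over the keys that re-scans every value list per key (any(f in v ...)).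
import Mathlib
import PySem

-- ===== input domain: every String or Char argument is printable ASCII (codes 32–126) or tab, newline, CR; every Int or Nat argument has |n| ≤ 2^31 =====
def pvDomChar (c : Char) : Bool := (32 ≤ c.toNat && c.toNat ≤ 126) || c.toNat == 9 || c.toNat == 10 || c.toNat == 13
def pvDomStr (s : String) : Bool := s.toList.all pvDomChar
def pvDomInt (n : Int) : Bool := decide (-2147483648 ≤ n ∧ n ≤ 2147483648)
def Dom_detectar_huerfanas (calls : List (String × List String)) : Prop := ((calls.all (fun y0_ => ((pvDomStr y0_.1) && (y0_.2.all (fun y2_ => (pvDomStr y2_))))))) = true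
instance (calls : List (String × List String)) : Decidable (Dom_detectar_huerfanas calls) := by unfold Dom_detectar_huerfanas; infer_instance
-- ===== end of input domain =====

-- B drops the precomputed union set: a single comprehension over the keys re-scans
-- every value list per key; same output order and values (objective: simpler).

-- ===== PORT A =====
def detectar_huerfanas (calls : List (String × List String)) : List String :=
  let llamadas : PySem.Set String :=
    calls.foldl (fun s p => PySem.Set.update s p.2) PySem.Set.empty
  calls.foldl (fun h p => if !(PySem.Set.contains llamadas p.1) then h ++ [p.1] else h) []

-- ===== PORT B =====
def detectar_huerfanas_alt (calls : List (String × List String)) : List String :=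
  calls.filterMap (fun p =>
    if calls.any (fun q => q.2.contains p.1) then none else some p.1)

-- ===== PRECONDITION & SPEC =====
def Spec_detectar_huerfanas (calls : List (String × List String)) (out : List String) : Prop := out = detectar_huerfanas_alt calls
instance (calls : List (String × List String)) (out : List String) : Decidable (Spec_detectar_huerfanas calls out) := by unfold Spec_detectar_huerfanas; infer_instance

-- ===== CLAIM (what is proved, stated in full; the proofs are below) =====
def Claim_equal_detectar_huerfanas : Prop := ∀ (calls : List (String × List String)), Dom_detectar_huerfanas calls → Spec_detectar_huerfanas calls (detectar_huerfanas calls)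

-- ===== LEMMAS AND PROOFS =====

-- membership in the union set A builds = some value list contains it
theorem mem_foldl_update {calls : List (String × List String)} {s : PySem.Set String} {f : String} :
    f ∈ calls.foldl (fun s p => PySem.Set.update s p.2) s ↔ f ∈ s ∨ ∃ q ∈ calls, f ∈ q.2 := by
  induction calls generalizing s with
  | nil => simp
  | cons p rest ih =>
    simp only [List.foldl_cons, ih, PySem.Set.mem_update, List.mem_cons]
    constructor
    · rintro (⟨h | h⟩ | ⟨q, hq, hf⟩)
      · exact Or.inl h
      · exact Or.inr ⟨p, Or.inl rfl, h⟩
      · exact Or.inr ⟨q, Or.inr hq, hf⟩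
    · rintro (h | ⟨q, (rfl | hq), hf⟩)
      · exact Or.inl (Or.inl h)
      · exact Or.inl (Or.inr hf)
      · exact Or.inr ⟨q, hq, hf⟩

theorem contains_llamadas (calls : List (String × List String)) (f : String) :
    PySem.Set.contains (calls.foldl (fun s p => PySem.Set.update s p.2) PySem.Set.empty) f
      = calls.any (fun q => q.2.contains f) := by
  rw [Bool.eq_iff_iff]
  simp only [PySem.Set.contains_eq_listContains, List.contains_eq_mem, List.any_eq_true,
    decide_eq_true_eq, mem_foldl_update]
  simp [PySem.Set.empty]

theorem filterMap_if_eq (calls : List (String × List String)) (c : String × List String → Bool) :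
    calls.filterMap (fun p => if c p then none else some p.1)
      = calls.foldl (fun h p => if !(c p) then h ++ [p.1] else h) [] := by
  rw [PySem.List.foldl_append_if (fun p => !(c p)) Prod.fst]
  simp only [List.nil_append]
  induction calls with
  | nil => simp
  | cons p rest ih =>
    by_cases h : c p = true <;> simp [h, ih]

-- ===== VERDICT (by name: the statement is the Claim_ definition above) =====
theorem detectar_huerfanas_spec : Claim_equal_detectar_huerfanas := by
  intro calls _
  unfold Spec_detectar_huerfanas detectar_huerfanas detectar_huerfanas_alt
  rw [filterMap_if_eq]
  simp only [contains_llamadas]
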